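-- pv_equiv track=rewrite | github.com/miliar/Code_Jam_Webscraper | solutions_python/solutions_year17_round0_nr3/1095.py | solve
-- ===== SOURCE A (Python) =====
-- from collections import defaultdict
--
-- def solve(N, K):
--     ranges = defaultdict(int)
--     ranges[N] += 1
--
--     for i in range(K):
--         ls = N
--         rs = N
--         min_ls = -1
--         min_rs = -1
--         min_range = N
--         for r in ranges:
--             mid = (r + 1) // 2
--             new_ls = mid - 1
--             new_rs = r - mid
--             if (new_ls > min_ls) or (new_ls == min_ls and new_rs > min_rs):
--                 ls = new_ls
--                 rs = new_rs
--                 min_range = r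
--                 min_ls = ls
--                 min_rs = rs
--         ranges[min_range] -= 1
--         if ranges[min_range] == 0:
--             del ranges[min_range]
--         ranges[ls] += 1
--         ranges[rs] += 1
--     return rs, ls
-- ===== SOURCE B (Python) =====
-- def solve(N, K):
--     # Batch by generations: the pieces of two distinct sizes (u and u-1) per
--     # generation; process whole generations at once instead of one split at a time.
--     u, a, b = N, 1, 0   # a pieces of size u, b pieces of size u-1
--     while u > 0:
--         if K <= a:
--             m = u
--             return m - (m + 1) // 2, (m + 1) // 2 - 1
--         if K <= a + b:
--             m = u - 1
--             return m - (m + 1) // 2, (m + 1) // 2 - 1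
--         K -= a + b
--         if u % 2 == 0:
--             u, a, b = u // 2, a, a + 2 * b
--         else:
--             u, a, b = u // 2, 2 * a + b, b
--     return 0, -1
-- ===== Notes on version B (the rewrite author's own statement) =====
-- stated objective: faster
-- what changed: A simulates all K splits one at a time, rescanning a dict of range sizes each iteration; B exploits that at any moment only sizes u and u-1 exist at the splitting frontier and consumes a whole generation of equal-sized ranges per arithmetic step, halving u each time.
-- outside the precondition, e.g. on solve(-5, 1): A returns (-5, -5), B returns (0, -1); on solve(3, 0): A raises UnboundLocalError, B returns (1, 1)
import Mathlib
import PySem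

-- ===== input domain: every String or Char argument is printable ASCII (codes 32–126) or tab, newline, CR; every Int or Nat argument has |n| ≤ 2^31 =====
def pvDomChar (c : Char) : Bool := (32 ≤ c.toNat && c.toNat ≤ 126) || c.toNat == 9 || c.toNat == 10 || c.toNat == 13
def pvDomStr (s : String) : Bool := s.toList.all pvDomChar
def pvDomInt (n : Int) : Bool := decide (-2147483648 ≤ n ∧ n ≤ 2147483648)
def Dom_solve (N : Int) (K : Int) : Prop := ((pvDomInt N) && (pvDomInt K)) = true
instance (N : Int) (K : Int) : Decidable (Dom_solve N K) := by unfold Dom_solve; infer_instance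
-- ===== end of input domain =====

-- B replaces A's split-one-range-at-a-time loop (K dict-scanning iterations) by
-- batch-processing whole generations of equal-sized ranges with plain arithmetic.

-- ===== PORT A =====
-- body of A's inner 'for r in ranges:' loop; state is (ls, rs, min_ls, min_rs, min_range)
def solveSel (st : Int × Int × Int × Int × Int) (r : Int) : Int × Int × Int × Int × Int :=
  let mid := PySem.Int.floordiv (r + 1) 2
  let new_ls := mid - 1
  let new_rs := r - mid
  if new_ls > st.2.2.1 ∨ (new_ls = st.2.2.1 ∧ new_rs > st.2.2.2.1) then
    (new_ls, new_rs, new_ls, new_rs, r)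
  else st

-- one iteration of A's 'for i in range(K)' loop; state is (ranges, ls, rs)
def solveStep (N : Int) (st : PySem.Dict Int Int × Int × Int) : PySem.Dict Int Int × Int × Int :=
  let sel := st.1.keys.foldl solveSel (N, N, -1, -1, N)
  let ls := sel.1
  let rs := sel.2.1
  let min_range := sel.2.2.2.2
  let d1 := st.1.modify min_range 0 (· - 1)                      -- ranges[min_range] -= 1
  let d2 := if d1.getD min_range 0 = 0 then d1.erase min_range else d1   -- del ranges[min_range]
  let d3 := d2.modify ls 0 (· + 1)                               -- ranges[ls] += 1
  let d4 := d3.modify rs 0 (· + 1)                               -- ranges[rs] += 1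
  (d4, ls, rs)

-- Python's ls/rs are unbound before the first iteration (K < 1 raises UnboundLocalError,
-- excluded by Pre_solve); the initial (0, 0) below is a never-returned placeholder for that.
def solve (N : Int) (K : Int) : Int × Int :=
  let d0 := (PySem.Dict.empty : PySem.Dict Int Int).modify N 0 (· + 1)   -- ranges[N] += 1
  let fin := (PySem.List.pyRange 0 K 1).foldl (fun st _ => solveStep N st) (d0, 0, 0)
  (fin.2.2, fin.2.1)                                             -- return rs, ls

-- ===== PORT B =====
-- state: a ranges of size u and b ranges of size u-1 (the only sizes present when a
-- generation starts); one loop step consumes a whole generation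
def solveAltGo (u a b K : Int) : Int × Int :=
  if _h : 0 < u then
    if K ≤ a then
      (u - PySem.Int.floordiv (u + 1) 2, PySem.Int.floordiv (u + 1) 2 - 1)
    else if K ≤ a + b then
      let m := u - 1
      (m - PySem.Int.floordiv (m + 1) 2, PySem.Int.floordiv (m + 1) 2 - 1)
    else if PySem.Int.mod u 2 = 0 then
      solveAltGo (PySem.Int.floordiv u 2) a (a + 2 * b) (K - (a + b))
    else
      solveAltGo (PySem.Int.floordiv u 2) (2 * a + b) b (K - (a + b))
  else (0, -1)
termination_by u.toNat
decreasing_by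
  all_goals
    rw [PySem.Int.floordiv_eq_ediv_of_pos (by norm_num : (0:Int) < 2)]
    omega

def solve_alt (N : Int) (K : Int) : Int × Int := solveAltGo N 1 0 K

-- ===== PRECONDITION & SPEC =====
-- Pre_solve excludes K < 1, where A raises UnboundLocalError (ls/rs never bound), and
-- negative N, outside the natural domain of this stall-count task, where A's returned
-- (N, N) is an artefact of no dict entry passing the selection threshold min_ls = -1.
def Pre_solve (N : Int) (K : Int) : Prop := 0 ≤ N ∧ 1 ≤ K
instance (N : Int) (K : Int) : Decidable (Pre_solve N K) := by unfold Pre_solve; infer_instance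

def pvWitness_solve : Int × Int := (10, 4)

def Spec_solve (N : Int) (K : Int) (out : Int × Int) : Prop := out = solve_alt N K
instance (N : Int) (K : Int) (out : Int × Int) : Decidable (Spec_solve N K out) := by unfold Spec_solve; infer_instance

-- ===== CLAIM (what is proved, stated in full; the proofs are below) =====
def Claim_equal_solve : Prop := ∀ (N : Int) (K : Int), Dom_solve N K → Pre_solve N K → Spec_solve N K (solve N K)

-- ===== LEMMAS AND PROOFS =====

-- the two halves a range x splits into (ls and rs of A, with Int.ediv)
def lsv (x : Int) : Int := (x + 1) / 2 - 1
def rsv (x : Int) : Int := x - (x + 1) / 2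

-- count of ranges of size k in A's dict mid-generation: a ranges of size u and b of
-- size u-1 at generation start, j1 of the u's and j2 of the (u-1)'s already split
def cntSt (u a b j1 j2 k : Int) : Int :=
  (if k = u then a - j1 else 0) + (if k = u - 1 then b - j2 else 0)
  + (if k = u / 2 then (if u % 2 = 0 then j1 else 2 * j1 + j2) else 0)
  + (if k = u / 2 - 1 then (if u % 2 = 0 then j1 + 2 * j2 else j2) else 0)

def toOpt (c : Int) : Option Int := if c = 0 then none else some c

-- the dict d holds exactly the counts f (keys are exactly the k with f k ≠ 0)
def DSpec (d : PySem.Dict Int Int) (f : Int → Int) : Prop :=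
  d.keys.Nodup ∧ ∀ k, d.get? k = toOpt (f k)

def RelD (d : PySem.Dict Int Int) (u a b j1 j2 : Int) : Prop :=
  DSpec d (cntSt u a b j1 j2)

-- absorbing end regime: only sizes 0 (at least one) and -1 remain
def ZRel (d : PySem.Dict Int Int) : Prop :=
  ∃ f, DSpec d f ∧ 0 < f 0 ∧ (∀ k, 0 ≤ f k) ∧ ∀ k, k ≠ 0 → k ≠ -1 → f k = 0

-- the state A's selection fold is in once it has seen maximum r = m (and m ≥ 0)
def selSt (m : Int) : Int × Int × Int × Int × Int := (lsv m, rsv m, lsv m, rsv m, m)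

theorem fd_two (x : Int) : PySem.Int.floordiv x 2 = x / 2 :=
  PySem.Int.floordiv_eq_ediv_of_pos (by norm_num)

-- ---- the inner selection fold picks the numerically largest key ----

theorem solveSel_sel (m r : Int) (h0 : 0 ≤ m) :
    solveSel (selSt m) r = selSt (max m r) := by
  simp only [solveSel, selSt, fd_two, lsv, rsv]
  split_ifs with h
  · have : m < r := by omega
    simp [max_eq_right this.le]
  · have : r ≤ m := by omega
    simp [max_eq_left (by omega : r ≤ m)]

theorem solveSel_init (N r : Int) :
    solveSel (N, N, -1, -1, N) r = if 0 ≤ r then selSt r else (N, N, -1, -1, N) := by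
  simp only [solveSel, selSt, fd_two, lsv, rsv]
  split_ifs with h h' <;> first | rfl | omega

theorem foldSel_from_sel (l : List Int) (m0 m : Int) (h0 : 0 ≤ m0) (hle : m0 ≤ m)
    (hmem : m = m0 ∨ m ∈ l) (hbd : ∀ k ∈ l, k ≤ m) :
    l.foldl solveSel (selSt m0) = selSt m := by
  induction l generalizing m0 with
  | nil =>
      rcases hmem with h | h
      · subst h; rfl
      · cases h
  | cons x t ih =>
      have hx : x ≤ m := hbd x (by simp)
      simp only [List.foldl, solveSel_sel _ _ h0]
      refine ih (max m0 x) (by omega) (by omega) ?_ (fun k hk => hbd k (by simp [hk]))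
      rcases hmem with h | h
      · left; omega
      · rcases List.mem_cons.mp h with h | h
        · left; omega
        · right; exact h

theorem foldSel (N : Int) (l : List Int) (m : Int) (h0 : 0 ≤ m) (hmem : m ∈ l)
    (hbd : ∀ k ∈ l, k ≤ m) :
    l.foldl solveSel (N, N, -1, -1, N) = selSt m := by
  induction l with
  | nil => cases hmem
  | cons x t ih =>
      have hx : x ≤ m := hbd x (by simp)
      simp only [List.foldl, solveSel_init]
      split_ifs with hxx
      · refine foldSel_from_sel t x m hxx hx ?_ (fun k hk => hbd k (by simp [hk]))
        rcases List.mem_cons.mp hmem with h | h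
        · left; omega
        · right; exact h
      · refine ih ?_ (fun k hk => hbd k (by simp [hk]))
        rcases List.mem_cons.mp hmem with h | h
        · omega
        · exact h

-- ---- pointwise lookup through A's dict update block ----

theorem get?_modify (d : PySem.Dict Int Int) (k k' : Int) (f : Int → Int) :
    (d.modify k 0 f).get? k' = if k' = k then some (f (d.getD k 0)) else d.get? k' := by
  simp [PySem.Dict.modify, PySem.Dict.get?_insert]

theorem get?_erase (d : PySem.Dict Int Int) (k k' : Int) :
    (d.erase k).get? k' = if k' = k then none else d.get? k' := by
  rcases d with ⟨items⟩
  induction items with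
  | nil => simp [PySem.Dict.erase, PySem.Dict.get?]
  | cons p t ih =>
      simp only [PySem.Dict.erase, PySem.Dict.get?, List.filter_cons] at *
      by_cases h1 : p.1 = k
      · simp only [h1, beq_self_eq_true, Bool.not_true, if_neg (by simp : ¬(false = true))]
        rw [ih]
        by_cases h2 : k' = k
        · simp [h2]
        · simp only [if_neg h2, List.find?_cons]
          have : (p.1 == k') = false := by simp [h1]; omega
          simp [this]
      · have hb : (!(p.1 == k)) = true := by simp [h1]
        simp only [hb, if_true]
        by_cases h2 : p.1 = k'
        · simp [h2, if_neg (show ¬k' = k by omega)]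
        · have : (p.1 == k') = false := by simp [h2]
          simp only [List.find?_cons, this]
          rw [ih]

theorem nodup_keys_erase (d : PySem.Dict Int Int) (k : Int) (h : d.keys.Nodup) :
    (d.erase k).keys.Nodup := by
  rcases d with ⟨items⟩
  simp only [PySem.Dict.erase, PySem.Dict.keys] at *
  exact (List.Sublist.map _ List.filter_sublist).nodup h

theorem nodup_keys_modify (d : PySem.Dict Int Int) (k : Int) (f : Int → Int)
    (h : d.keys.Nodup) : (d.modify k 0 f).keys.Nodup := by
  simp only [PySem.Dict.modify]
  exact PySem.Dict.nodup_keys_insert _ _ _ h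

theorem getD_of_DSpec (d : PySem.Dict Int Int) (f : Int → Int) (hs : DSpec d f) (k : Int) :
    d.getD k 0 = f k := by
  rw [PySem.Dict.getD_eq_get?_getD, hs.2 k]
  unfold toOpt
  split_ifs with h <;> simp [h]

theorem mem_keys_of_DSpec (d : PySem.Dict Int Int) (f : Int → Int) (hs : DSpec d f)
    (k : Int) : k ∈ d.keys ↔ f k ≠ 0 := by
  rw [← not_iff_not, not_not, ← PySem.Dict.get?_eq_none_iff_not_mem_keys, hs.2 k]
  unfold toOpt
  split_ifs with h <;> simp [h]

theorem DSpec_modify_add_one (d : PySem.Dict Int Int) (f : Int → Int) (x : Int)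
    (hs : DSpec d f) (hx : 0 ≤ f x) :
    DSpec (d.modify x 0 (· + 1)) (fun k => f k + (if k = x then 1 else 0)) := by
  refine ⟨nodup_keys_modify d x _ hs.1, fun k => ?_⟩
  rw [get?_modify, getD_of_DSpec d f hs]
  split_ifs with h
  · subst h; simp [toOpt]; omega
  · rw [hs.2 k]; simp [h]

theorem DSpec_dec_erase (d : PySem.Dict Int Int) (f : Int → Int) (m : Int)
    (hs : DSpec d f) (hm : 0 < f m) :
    DSpec (if (d.modify m 0 (· - 1)).getD m 0 = 0
           then (d.modify m 0 (· - 1)).erase m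
           else d.modify m 0 (· - 1))
      (fun k => f k - (if k = m then 1 else 0)) := by
  have hnd1 := nodup_keys_modify d m (· - 1) hs.1
  have hgd : (d.modify m 0 (· - 1)).getD m 0 = f m - 1 := by
    rw [PySem.Dict.getD_eq_get?_getD, get?_modify, if_pos rfl, getD_of_DSpec d f hs]
    rfl
  rw [hgd]
  split_ifs with h0
  · refine ⟨nodup_keys_erase _ _ hnd1, fun k => ?_⟩
    rw [get?_erase]
    split_ifs with h1
    · subst h1; simp [toOpt]; omega
    · rw [get?_modify, if_neg h1, hs.2 k]; simp [h1]
  · refine ⟨hnd1, fun k => ?_⟩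
    rw [get?_modify, getD_of_DSpec d f hs]
    split_ifs with h1
    · subst h1; simp [toOpt]; omega
    · rw [hs.2 k]; simp [h1]

theorem updSpec (d : PySem.Dict Int Int) (f : Int → Int) (m ls rs : Int)
    (hs : DSpec d f) (hm : 0 < f m) (hnn : ∀ k, 0 ≤ f k) :
    DSpec (((if (d.modify m 0 (· - 1)).getD m 0 = 0
              then (d.modify m 0 (· - 1)).erase m
              else d.modify m 0 (· - 1)).modify ls 0 (· + 1)).modify rs 0 (· + 1))
      (fun k => f k - (if k = m then 1 else 0) + (if k = ls then 1 else 0)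
                + (if k = rs then 1 else 0)) := by
  have hf2 : ∀ k, 0 ≤ f k - (if k = m then 1 else 0) := by
    intro k
    have := hnn k
    split_ifs with h
    · subst h; omega
    · omega
  have h2 := DSpec_dec_erase d f m hs hm
  have h3 := DSpec_modify_add_one _ _ ls h2 (hf2 ls)
  have h4 := DSpec_modify_add_one _ _ rs h3 (by have := hf2 rs; split_ifs <;> omega)
  convert h4 using 2

-- ---- one iteration of A's outer loop, on a dict described by counts f ----

theorem solveStep_spec (N : Int) (d : PySem.Dict Int Int) (x y : Int) (f : Int → Int)
    (m : Int) (hs : DSpec d f) (h0 : 0 ≤ m) (hm : 0 < f m)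
    (hmax : ∀ k, f k ≠ 0 → k ≤ m) (hnn : ∀ k, 0 ≤ f k) :
    (solveStep N (d, x, y)).2 = (lsv m, rsv m) ∧
    DSpec (solveStep N (d, x, y)).1
      (fun k => f k - (if k = m then 1 else 0) + (if k = lsv m then 1 else 0)
                + (if k = rsv m then 1 else 0)) := by
  have hsel : d.keys.foldl solveSel (N, N, -1, -1, N) = selSt m := by
    refine foldSel N d.keys m h0 ?_ ?_
    · exact (mem_keys_of_DSpec d f hs m).mpr (by omega)
    · intro k hk
      exact hmax k ((mem_keys_of_DSpec d f hs k).mp hk)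
  unfold solveStep
  rw [hsel]
  exact ⟨rfl, updSpec d f m (lsv m) (rsv m) hs hm hnn⟩

-- ---- arithmetic facts about the counts ----

theorem cnt_nonneg (u a b j1 j2 : Int) (h1 : 0 ≤ j1) (h2 : j1 ≤ a) (h3 : 0 ≤ j2)
    (h4 : j2 ≤ b) : ∀ k, 0 ≤ cntSt u a b j1 j2 k := by
  intro k
  unfold cntSt
  split_ifs <;> omega

theorem cnt_le_max (u a b j1 j2 k : Int) (hu : 1 ≤ u) (h : cntSt u a b j1 j2 k ≠ 0) :
    k ≤ u := by
  unfold cntSt at h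
  split_ifs at h <;> omega

theorem cnt_le_max' (u a b j2 k : Int) (hu : 1 ≤ u) (h : cntSt u a b a j2 k ≠ 0) :
    k ≤ u - 1 := by
  unfold cntSt at h
  split_ifs at h <;> omega

theorem cnt_pos_u (u a b j1 j2 : Int) (hu : 1 ≤ u) (hj : j1 < a) (h3 : 0 ≤ j2)
    (h4 : j2 ≤ b) (h5 : 0 ≤ j1) : 0 < cntSt u a b j1 j2 u := by
  unfold cntSt
  split_ifs <;> omega

theorem cnt_pos_u1 (u a b j2 : Int) (hu : 1 ≤ u) (hj : j2 < b) (h3 : 0 ≤ j2)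
    (h5 : 0 ≤ a) : 0 < cntSt u a b a j2 (u - 1) := by
  unfold cntSt
  split_ifs <;> omega

theorem cnt_step1 (u a b j1 j2 : Int) (hu : 1 ≤ u) : ∀ k,
    cntSt u a b (j1 + 1) j2 k
      = cntSt u a b j1 j2 k - (if k = u then 1 else 0) + (if k = lsv u then 1 else 0)
        + (if k = rsv u then 1 else 0) := by
  intro k
  unfold cntSt lsv rsv
  split_ifs <;> omega

theorem cnt_step2 (u a b j2 : Int) (hu : 1 ≤ u) : ∀ k,
    cntSt u a b a (j2 + 1) k
      = cntSt u a b a j2 k - (if k = u - 1 then 1 else 0)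
        + (if k = lsv (u - 1) then 1 else 0) + (if k = rsv (u - 1) then 1 else 0) := by
  intro k
  unfold cntSt lsv rsv
  split_ifs <;> omega

theorem cnt_reparam (u a b : Int) (hu : 1 ≤ u) : ∀ k,
    cntSt u a b a b k
      = cntSt (u / 2) (if u % 2 = 0 then a else 2 * a + b)
          (if u % 2 = 0 then a + 2 * b else b) 0 0 k := by
  intro k
  unfold cntSt
  split_ifs <;> omega

-- ---- multi-step runs ----

theorem runA (N u a b j2 : Int) (n : ℕ) : ∀ (j1 : Int) (st : PySem.Dict Int Int × Int × Int),
    1 ≤ u → 0 ≤ j1 → j1 + n ≤ a → 0 ≤ j2 → j2 ≤ b → RelD st.1 u a b j1 j2 →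
    RelD ((solveStep N)^[n] st).1 u a b (j1 + n) j2 ∧
      (0 < n → ((solveStep N)^[n] st).2 = (lsv u, rsv u)) := by
  induction n with
  | zero => intro j1 st hu h1 h2 h3 h4 hrel; simpa using hrel
  | succ n ih =>
      intro j1 st hu h1 h2 h3 h4 hrel
      have hstep := solveStep_spec N st.1 st.2.1 st.2.2 (cntSt u a b j1 j2) u hrel
        (by omega) (cnt_pos_u u a b j1 j2 hu (by omega) h3 h4 h1)
        (fun k hk => cnt_le_max u a b j1 j2 k hu hk)
        (cnt_nonneg u a b j1 j2 h1 (by omega) h3 h4)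
      have hrel' : RelD (solveStep N st).1 u a b (j1 + 1) j2 := by
        have := hstep.2
        unfold RelD
        have hfe : (fun k => cntSt u a b j1 j2 k - (if k = u then 1 else 0)
            + (if k = lsv u then 1 else 0) + (if k = rsv u then 1 else 0))
            = cntSt u a b (j1 + 1) j2 := by
          funext k
          rw [cnt_step1 u a b j1 j2 hu k]
        rw [← hfe]
        simpa using this
      have hiter : (solveStep N)^[n + 1] st = (solveStep N)^[n] (solveStep N st) :=
        Function.iterate_succ_apply (solveStep N) n st
      rw [hiter]
      rcases Nat.eq_zero_or_pos n with hn | hn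
      · subst hn
        constructor
        · simpa [show j1 + (1 : ℕ) = j1 + 1 by push_cast; ring] using hrel'
        · intro _
          simp only [Function.iterate_zero, id]
          have := hstep.1
          simpa using this
      · have := ih (j1 + 1) (solveStep N st) hu (by omega) (by push_cast at h2 ⊢; omega)
          h3 h4 (by simpa using hrel')
        constructor
        · have h := this.1
          have : ((j1 + 1) + (n : Int)) = j1 + ((n : ℕ) + 1 : ℕ) := by push_cast; ring
          rw [← this]
          exact h
        · intro _
          exact this.2 hn

theorem runB (N u a b : Int) (n : ℕ) : ∀ (j2 : Int) (st : PySem.Dict Int Int × Int × Int),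
    1 ≤ u → 0 ≤ a → 0 ≤ j2 → j2 + n ≤ b → RelD st.1 u a b a j2 →
    RelD ((solveStep N)^[n] st).1 u a b a (j2 + n) ∧
      (0 < n → ((solveStep N)^[n] st).2 = (lsv (u - 1), rsv (u - 1))) := by
  induction n with
  | zero => intro j2 st hu h1 h2 h3 hrel; simpa using hrel
  | succ n ih =>
      intro j2 st hu h1 h2 h3 hrel
      have hstep := solveStep_spec N st.1 st.2.1 st.2.2 (cntSt u a b a j2) (u - 1) hrel
        (by omega) (cnt_pos_u1 u a b j2 hu (by omega) h2 h1)
        (fun k hk => cnt_le_max' u a b j2 k hu hk)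
        (cnt_nonneg u a b a j2 h1 le_rfl h2 (by omega))
      have hrel' : RelD (solveStep N st).1 u a b a (j2 + 1) := by
        have := hstep.2
        unfold RelD
        have hfe : (fun k => cntSt u a b a j2 k - (if k = u - 1 then 1 else 0)
            + (if k = lsv (u - 1) then 1 else 0) + (if k = rsv (u - 1) then 1 else 0))
            = cntSt u a b a (j2 + 1) := by
          funext k
          rw [cnt_step2 u a b j2 hu k]
        rw [← hfe]
        simpa using this
      rw [Function.iterate_succ_apply (solveStep N) n st]
      rcases Nat.eq_zero_or_pos n with hn | hn
      · subst hn
        constructor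
        · simpa [show j2 + (1 : ℕ) = j2 + 1 by push_cast; ring] using hrel'
        · intro _
          simp only [Function.iterate_zero, id]
          have := hstep.1
          simpa using this
      · have := ih (j2 + 1) (solveStep N st) hu h1 (by omega) (by push_cast at h3 ⊢; omega)
          (by simpa using hrel')
        constructor
        · have h := this.1
          have : ((j2 + 1) + (n : Int)) = j2 + ((n : ℕ) + 1 : ℕ) := by push_cast; ring
          rw [← this]
          exact h
        · intro _
          exact this.2 hn

-- ---- the absorbing 0/-1 regime ----

theorem zstep (N : Int) (st : PySem.Dict Int Int × Int × Int) (hz : ZRel st.1) :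
    (solveStep N st).2 = (-1, 0) ∧ ZRel (solveStep N st).1 := by
  obtain ⟨f, hs, hf0, hnn, hout⟩ := hz
  have hstep := solveStep_spec N st.1 st.2.1 st.2.2 f 0 hs le_rfl hf0
    (fun k hk => by by_contra hgt; exact hk (hout k (by omega) (by omega))) hnn
  have hlr : lsv 0 = -1 ∧ rsv 0 = 0 := by constructor <;> rfl
  constructor
  · rw [hstep.1, hlr.1, hlr.2]
  · refine ⟨_, hstep.2, ?_, ?_, ?_⟩
    · simp only [lsv, rsv]
      split_ifs <;> omega
    · intro k
      have := hnn k
      simp only [lsv, rsv]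
      split_ifs <;> omega
    · intro k hk0 hk1
      have := hout k hk0 hk1
      simp only [lsv, rsv]
      split_ifs <;> omega

theorem zrun (N : Int) (n : ℕ) (hn : 0 < n) (st : PySem.Dict Int Int × Int × Int)
    (hz : ZRel st.1) : ((solveStep N)^[n] st).2 = (-1, 0) := by
  induction n generalizing st with
  | zero => omega
  | succ n ih =>
      rw [Function.iterate_succ_apply]
      rcases Nat.eq_zero_or_pos n with h | h
      · subst h
        simpa using (zstep N st hz).1
      · exact ih h _ (zstep N st hz).2

-- ---- main correspondence: A's iterated loop computes B's batch recursion ----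

theorem pymod_two (u : Int) : PySem.Int.mod u 2 = u % 2 :=
  PySem.Int.mod_eq_emod_of_pos (by norm_num)

theorem mainRun (N : Int) (un : ℕ) : ∀ (u a b K : Int)
    (st : PySem.Dict Int Int × Int × Int), u.toNat = un →
    0 ≤ u → 0 ≤ a → 0 ≤ b → 1 ≤ a + b → (u = 0 → 1 ≤ a) → 1 ≤ K →
    RelD st.1 u a b 0 0 →
    ((((solveStep N)^[K.toNat] st).2.2, ((solveStep N)^[K.toNat] st).2.1)
      = solveAltGo u a b K) := by
  induction un using Nat.strong_induction_on with
  | _ un ih =>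
      intro u a b K st hun hu ha hb hab hu0 hK hrel
      by_cases hupos : 0 < u
      · -- u ≥ 1
        rw [solveAltGo, dif_pos hupos]
        rcases le_or_gt K a with hKa | haK
        · -- first branch: K splits of size-u ranges
          have hr := runA N u a b 0 K.toNat 0 st (by omega) le_rfl (by omega) le_rfl hb hrel
          have h2 := hr.2 (by omega)
          rw [if_pos hKa, fd_two]
          rw [Prod.ext_iff] at h2
          have e1 := h2.1
          have e2 := h2.2
          simp only at e1 e2
          rw [e2, e1]
          simp [lsv, rsv]
        · rcases le_or_gt K (a + b) with hKab | habK
          · -- second branch: finish the u's, then K - a splits of size-(u-1) ranges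
            have hsplit : K.toNat = (K - a).toNat + a.toNat := by omega
            rw [if_neg (by omega), if_pos hKab, hsplit, Function.iterate_add_apply]
            have hr1 := runA N u a b 0 a.toNat 0 st (by omega) le_rfl (by omega) le_rfl hb hrel
            have hrelA : RelD ((solveStep N)^[a.toNat] st).1 u a b a 0 := by
              have h := hr1.1
              rw [show ((0 : Int) + (a.toNat : Int)) = a by omega] at h
              exact h
            have hr2 := runB N u a b (K - a).toNat 0 ((solveStep N)^[a.toNat] st)
              (by omega) ha le_rfl (by omega) hrelA
            have h2 := hr2.2 (by omega)
            rw [Prod.ext_iff] at h2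
            have e1 := h2.1
            have e2 := h2.2
            simp only at e1 e2
            rw [e2, e1]
            simp [fd_two, lsv, rsv]
          · -- recurse into the next generation
            have hsplit : K.toNat = (K - (a + b)).toNat + (b.toNat + a.toNat) := by omega
            rw [if_neg (by omega), if_neg (by omega), hsplit, Function.iterate_add_apply,
              Function.iterate_add_apply]
            have hr1 := runA N u a b 0 a.toNat 0 st (by omega) le_rfl (by omega) le_rfl hb hrel
            have hrelA : RelD ((solveStep N)^[a.toNat] st).1 u a b a 0 := by
              have h := hr1.1
              rw [show ((0 : Int) + (a.toNat : Int)) = a by omega] at h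
              exact h
            have hr2 := runB N u a b b.toNat 0 ((solveStep N)^[a.toNat] st)
              (by omega) ha le_rfl (by omega) hrelA
            have hrelB : RelD ((solveStep N)^[b.toNat] ((solveStep N)^[a.toNat] st)).1
                u a b a b := by
              have h := hr2.1
              rw [show ((0 : Int) + (b.toNat : Int)) = b by omega] at h
              exact h
            -- reparameterize to the next generation
            have hrelC : RelD ((solveStep N)^[b.toNat] ((solveStep N)^[a.toNat] st)).1
                (u / 2) (if u % 2 = 0 then a else 2 * a + b)
                (if u % 2 = 0 then a + 2 * b else b) 0 0 := by
              unfold RelD at hrelB ⊢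
              have hfe : cntSt u a b a b = cntSt (u / 2) (if u % 2 = 0 then a else 2 * a + b)
                  (if u % 2 = 0 then a + 2 * b else b) 0 0 := by
                funext k
                exact cnt_reparam u a b (by omega) k
              rw [← hfe]
              exact hrelB
            have hrec := ih (u / 2).toNat (by omega) (u / 2)
              (if u % 2 = 0 then a else 2 * a + b)
              (if u % 2 = 0 then a + 2 * b else b) (K - (a + b))
              ((solveStep N)^[b.toNat] ((solveStep N)^[a.toNat] st)) rfl
              (by omega) (by split_ifs <;> omega) (by split_ifs <;> omega)
              (by split_ifs <;> omega) (by intro h; split_ifs with hp <;> omega)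
              (by omega) hrelC
            rw [hrec, fd_two, pymod_two]
            split_ifs with hp
            · rfl
            · rfl
      · -- u = 0: absorbing regime
        have hu0' : u = 0 := by omega
        subst hu0'
        have hz : ZRel st.1 := by
          refine ⟨cntSt 0 a b 0 0, hrel, ?_, ?_, ?_⟩
          · unfold cntSt; norm_num; omega
          · intro k; unfold cntSt; split_ifs <;> omega
          · intro k hk0 hk1; unfold cntSt; split_ifs <;> omega
        have := zrun N K.toNat (by omega) st hz
        rw [Prod.ext_iff] at this
        have e1 := this.1
        have e2 := this.2
        simp only at e1 e2
        rw [solveAltGo, dif_neg (by omega), e1, e2]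

-- ---- assembling the pieces ----

theorem foldl_ignore {β : Type} (l : List Int) (g : β → β) (s : β) :
    l.foldl (fun s _ => g s) s = g^[l.length] s := by
  induction l generalizing s with
  | nil => rfl
  | cons x t ih => simp [List.foldl, ih, Function.iterate_succ_apply]

theorem pyRange_len (K : Int) (h : 0 ≤ K) : (PySem.List.pyRange 0 K 1).length = K.toNat := by
  simp [PySem.List.pyRange]
  omega

theorem d0_spec (N : Int) :
    RelD ((PySem.Dict.empty : PySem.Dict Int Int).modify N 0 (· + 1)) N 1 0 0 0 := by
  refine ⟨nodup_keys_modify _ _ _ (by simp [PySem.Dict.empty, PySem.Dict.keys]), fun k => ?_⟩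
  rw [get?_modify]
  have he : (PySem.Dict.empty : PySem.Dict Int Int).getD N 0 = 0 := by
    simp [pysem]
  have he2 : (PySem.Dict.empty : PySem.Dict Int Int).get? k = none := by
    simp [pysem]
  have hc : cntSt N 1 0 0 0 k = if k = N then 1 else 0 := by
    unfold cntSt
    split_ifs <;> omega
  rw [hc, he]
  split_ifs with h
  · simp [toOpt]
  · rw [he2]; simp [toOpt]

-- ===== VERDICT (by name: the statement is the Claim_ definition above) =====
theorem solve_spec : Claim_equal_solve := by
  intro N K _hdom hpre
  obtain ⟨hN, hK⟩ := hpre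
  unfold Spec_solve solve solve_alt
  change ((((PySem.List.pyRange 0 K 1).foldl (fun st _ => solveStep N st)
      ((PySem.Dict.empty : PySem.Dict Int Int).modify N 0 (· + 1), 0, 0)).2.2,
    ((PySem.List.pyRange 0 K 1).foldl (fun st _ => solveStep N st)
      ((PySem.Dict.empty : PySem.Dict Int Int).modify N 0 (· + 1), 0, 0)).2.1)
    = solveAltGo N 1 0 K)
  rw [foldl_ignore, pyRange_len K (by omega)]
  exact mainRun N N.toNat N 1 0 K _ rfl hN (by omega) le_rfl (by omega) (by omega) hK
    (d0_spec N)
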